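-- pv_equiv track=rewrite | github.com/SagarDhok/CodeDaily | GeeksOfGeeks/day-113.py | countFibonacciNumbers
-- ===== SOURCE A (Python) =====
-- def countFibonacciNumbers(arr):
--   max_val = max(arr)
--
--   fib_set = set()
--   a,b = 0,1
--   while a<=max_val:
--     fib_set.add(a)
--     a,b = b, a + b
--
--
--   count = 0
--   for i in arr:
--      if i in fib_set:
--          count+=1
--   return count
-- ===== SOURCE B (Python) =====
-- def countFibonacciNumbers(arr):
--     m = max(arr)
--     freq = {}
--     for x in arr:
--         freq[x] = freq.get(x, 0) + 1
--     count = freq.get(0, 0) if m >= 0 else 0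
--     a, b = 1, 2
--     while a <= m:
--         count += freq.get(a, 0)
--         a, b = b, a + b
--     return count
-- ===== Notes on version B (the rewrite author's own statement) =====
-- stated objective: alternative
-- what changed: Instead of materialising a set of Fibonacci numbers and scanning the whole array testing membership, B builds a frequency dictionary of the array once and then walks the (duplicate-free) Fibonacci sequence itself, summing the multiplicities of each Fibonacci value; the per-element membership scan disappears.
import Mathlib
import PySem

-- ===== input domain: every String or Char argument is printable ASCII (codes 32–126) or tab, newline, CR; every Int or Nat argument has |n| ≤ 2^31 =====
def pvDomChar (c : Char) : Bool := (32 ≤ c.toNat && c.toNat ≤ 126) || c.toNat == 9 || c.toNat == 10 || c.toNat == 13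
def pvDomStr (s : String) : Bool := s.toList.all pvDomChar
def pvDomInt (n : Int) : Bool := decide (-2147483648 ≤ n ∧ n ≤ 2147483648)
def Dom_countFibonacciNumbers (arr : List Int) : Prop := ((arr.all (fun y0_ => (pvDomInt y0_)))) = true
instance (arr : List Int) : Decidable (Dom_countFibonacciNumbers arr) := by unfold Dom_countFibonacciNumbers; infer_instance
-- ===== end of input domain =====

-- B replaces A's Fibonacci SET + per-element membership scan by a frequency dictionary of the
-- array plus one walk over the duplicate-free Fibonacci sequence, summing multiplicities
-- (objective: alternative, same cost).

-- ===== PORT A =====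
-- A's 'while a <= max_val' loop building fib_set.  The fuel argument is a totality guard only:
-- from (0,1) the loop runs at most max_val + 2 iterations, so fuel m.toNat + 4 is never exhausted.
def fibSetLoopA (m : Int) (s : PySem.Set Int) (a b : Int) : Nat → PySem.Set Int
  | 0 => s
  | f + 1 => if a ≤ m then fibSetLoopA m (PySem.Set.add s a) b (a + b) f else s

def countFibonacciNumbers (arr : List Int) : Int :=
  match PySem.List.max? arr (fun x => x) with
  | none => 0   -- max(arr) raises ValueError on []: excluded by Pre_
  | some maxVal =>
    let fibSet := fibSetLoopA maxVal PySem.Set.empty 0 1 (maxVal.toNat + 4)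
    arr.foldl (fun count i => if i ∈ fibSet then count + 1 else count) 0

-- ===== PORT B =====
-- B's 'while a <= m' loop over the duplicate-free Fibonacci sequence 1,2,3,5,…, summing
-- multiplicities.  Fuel is a totality guard only (a increases every step from (1,2)).
def fibCountLoopB (freq : PySem.Dict Int Int) (m : Int) (count a b : Int) : Nat → Int
  | 0 => count
  | f + 1 => if a ≤ m then fibCountLoopB freq m (count + freq.getD a 0) b (a + b) f else count

def countFibonacciNumbers_alt (arr : List Int) : Int :=
  match PySem.List.max? arr (fun x => x) with
  | none => 0   -- max(arr) raises ValueError on []: excluded by Pre_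
  | some m =>
    let freq := arr.foldl (fun d x => d.insert x (d.getD x 0 + 1)) PySem.Dict.empty
    let count0 : Int := if 0 ≤ m then freq.getD 0 0 else 0
    fibCountLoopB freq m count0 1 2 (m.toNat + 2)

-- ===== PRECONDITION & SPEC =====
-- Pre_ excludes only the empty list, on which Python's max(arr) raises ValueError in both A and B.
def Pre_countFibonacciNumbers (arr : List Int) : Prop := arr ≠ []
instance (arr : List Int) : Decidable (Pre_countFibonacciNumbers arr) := by unfold Pre_countFibonacciNumbers; infer_instance

def pvWitness_countFibonacciNumbers : List Int := [0, 1, 4, 8, -3, 13]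

def Spec_countFibonacciNumbers (arr : List Int) (out : Int) : Prop := out = countFibonacciNumbers_alt arr
instance (arr : List Int) (out : Int) : Decidable (Spec_countFibonacciNumbers arr out) := by unfold Spec_countFibonacciNumbers; infer_instance

-- ===== CLAIM (what is proved, stated in full; the proofs are below) =====
def Claim_equal_countFibonacciNumbers : Prop := ∀ (arr : List Int), Dom_countFibonacciNumbers arr → Pre_countFibonacciNumbers arr → Spec_countFibonacciNumbers arr (countFibonacciNumbers arr)

-- ===== LEMMAS AND PROOFS =====

-- The common specification list: the values taken by 'a' while a ≤ m, starting from (a, b).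
def genFibs (m a b : Int) : Nat → List Int
  | 0 => []
  | f + 1 => if a ≤ m then a :: genFibs m b (a + b) f else []

-- Membership in A's set is membership in the generated value list.
theorem mem_fibSetLoopA (m : Int) (f : Nat) :
    ∀ (s : PySem.Set Int) (a b x : Int),
      x ∈ fibSetLoopA m s a b f ↔ x ∈ s ∨ x ∈ genFibs m a b f := by
  induction f with
  | zero => intro s a b x; simp [fibSetLoopA, genFibs]
  | succ f ih =>
    intro s a b x
    simp only [fibSetLoopA, genFibs]
    by_cases h : a ≤ m
    · simp only [if_pos h, ih, PySem.Set.mem_add, List.mem_cons]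
      tauto
    · simp [if_neg h]

-- B's loop is its starting count plus the sum of the multiplicities of the generated values.
theorem fibCountLoopB_eq_sum (freq : PySem.Dict Int Int) (m : Int) (f : Nat) :
    ∀ (count a b : Int),
      fibCountLoopB freq m count a b f
        = count + ((genFibs m a b f).map (fun v => freq.getD v 0)).sum := by
  induction f with
  | zero => intro count a b; simp [fibCountLoopB, genFibs]
  | succ f ih =>
    intro count a b
    simp only [fibCountLoopB, genFibs]
    by_cases h : a ≤ m
    · simp only [if_pos h, ih, List.map_cons, List.sum_cons]; ring
    · simp [if_neg h]

-- Every generated value is at least the start value a (for 0 < a < b).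
theorem genFibs_lower (m : Int) (f : Nat) :
    ∀ (a b : Int), 0 < a → a < b → ∀ x ∈ genFibs m a b f, a ≤ x := by
  induction f with
  | zero => intro a b _ _ x hx; simp [genFibs] at hx
  | succ f ih =>
    intro a b ha hab x hx
    simp only [genFibs] at hx
    by_cases h : a ≤ m
    · rw [if_pos h] at hx
      rcases List.mem_cons.mp hx with rfl | hx
      · exact le_refl x
      · exact le_of_lt (lt_of_lt_of_le hab (ih b (a + b) (ha.trans hab) (by omega) x hx))
    · rw [if_neg h] at hx; simp at hx

-- The generated list from 0 < a < b is strictly increasing, hence duplicate-free.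
theorem genFibs_pairwise (m : Int) (f : Nat) :
    ∀ (a b : Int), 0 < a → a < b → (genFibs m a b f).Pairwise (· < ·) := by
  induction f with
  | zero => intro a b _ _; simp [genFibs]
  | succ f ih =>
    intro a b ha hab
    simp only [genFibs]
    by_cases h : a ≤ m
    · rw [if_pos h]
      refine List.pairwise_cons.mpr ⟨fun x hx => ?_, ih b (a + b) (ha.trans hab) (by omega)⟩
      exact lt_of_lt_of_le hab (genFibs_lower m f b (a + b) (ha.trans hab) (by omega) x hx)
    · rw [if_neg h]; simp

-- A's generated list (from (0,1), with the fuel A's port uses) has the same members as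
-- {0 | 0 ≤ m} together with B's generated list (from (1,2), with the fuel B's port uses).
theorem mem_genFibs_A_iff (m x : Int) :
    x ∈ genFibs m 0 1 (m.toNat + 4)
      ↔ ((0 ≤ m ∧ x = 0) ∨ x ∈ genFibs m 1 2 (m.toNat + 2)) := by
  have h4 : m.toNat + 4 = (m.toNat + 3) + 1 := rfl
  have h3 : m.toNat + 3 = (m.toNat + 2) + 1 := rfl
  have h2 : m.toNat + 2 = (m.toNat + 1) + 1 := rfl
  by_cases h0 : 0 ≤ m
  · by_cases h1 : 1 ≤ m
    · rw [h4, h3, h2]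
      simp only [genFibs, if_pos h0, if_pos h1]
      norm_num [h1]
      tauto
    · have hm : m = 0 := by omega
      subst hm
      simp [genFibs]
  · have h1 : ¬ (1 : Int) ≤ m := by omega
    rw [h4, h2]
    simp [genFibs, h0, h1]

-- The frequency dictionary B builds looks up to the multiset count of the array.
theorem freq_getD_eq_count (arr : List Int) (v : Int) :
    (arr.foldl (fun d x => d.insert x (d.getD x 0 + 1)) PySem.Dict.empty).getD v 0
      = (arr.count v : Int) := by
  rw [PySem.Dict.getD_foldl_insert_add_one]
  simp

-- Counting the members of v :: L (v fresh) splits off count v.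
theorem countP_mem_cons (v : Int) (L : List Int) (hv : v ∉ L) (arr : List Int) :
    arr.countP (fun x => decide (x ∈ v :: L))
      = arr.count v + arr.countP (fun x => decide (x ∈ L)) := by
  induction arr with
  | nil => simp
  | cons y arr iha =>
    rw [List.countP_cons, List.count_cons, List.countP_cons, iha]
    by_cases hyv : y = v
    · subst hyv
      simp [hv]
      omega
    · by_cases hyL : y ∈ L <;> simp [hyv, hyL] <;> omega

-- Summing the counts of the distinct values of L is counting the members of L in arr.
theorem sum_count_eq_countP (arr : List Int) :
    ∀ (L : List Int), L.Nodup →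
      (L.map (fun v => (arr.count v : Int))).sum = (arr.countP (fun x => decide (x ∈ L)) : Int) := by
  intro L hL
  induction L with
  | nil => simp
  | cons v L ih =>
    rcases List.nodup_cons.mp hL with ⟨hv, hL'⟩
    rw [List.map_cons, List.sum_cons, ih hL', countP_mem_cons v L hv arr]
    push_cast
    ring

-- Counting with the A-membership predicate splits into the zero part and the L part.
theorem countP_A_split (m : Int) (L : List Int) (h0L : (0 : Int) ∉ L) (arr : List Int) :
    (arr.countP (fun x => decide ((0 ≤ m ∧ x = 0) ∨ x ∈ L)) : Int)
      = (if 0 ≤ m then (arr.count 0 : Int) else 0) + (arr.countP (fun x => decide (x ∈ L)) : Int) := by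
  by_cases h0 : 0 ≤ m
  · rw [if_pos h0]
    have hc : arr.countP (fun x => decide ((0 ≤ m ∧ x = 0) ∨ x ∈ L))
        = arr.countP (fun x => decide (x ∈ (0 : Int) :: L)) :=
      List.countP_congr (fun x _ => by simp only [decide_eq_true_eq]; simp [h0])
    rw [hc, countP_mem_cons 0 L h0L arr]
    push_cast
    ring
  · rw [if_neg h0]
    have hc : arr.countP (fun x => decide ((0 ≤ m ∧ x = 0) ∨ x ∈ L))
        = arr.countP (fun x => decide (x ∈ L)) :=
      List.countP_congr (fun x _ => by simp only [decide_eq_true_eq]; tauto)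
    rw [hc]
    ring

-- ===== VERDICT (by name: the statement is the Claim_ definition above) =====
theorem countFibonacciNumbers_spec : Claim_equal_countFibonacciNumbers := by
  intro arr _ hpre
  unfold Spec_countFibonacciNumbers countFibonacciNumbers countFibonacciNumbers_alt
  obtain ⟨m, hm⟩ : ∃ m, PySem.List.max? arr (fun x => x) = some m := by
    cases arr with
    | nil => exact absurd rfl hpre
    | cons h t => exact ⟨t.foldl max h, PySem.List.max?_id_cons h t⟩
  rw [hm]
  set L := genFibs m 1 2 (m.toNat + 2) with hLdef
  have hLpos : ∀ x ∈ L, (1 : Int) ≤ x := genFibs_lower m (m.toNat + 2) 1 2 (by omega) (by omega)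
  have h0L : (0 : Int) ∉ L := fun h => by have := hLpos 0 h; omega
  have hLnd : L.Nodup := (genFibs_pairwise m (m.toNat + 2) 1 2 (by omega) (by omega)).nodup
  -- A's side: the fold is a countP over membership in the generated list
  have hmemA : ∀ x : Int,
      (x ∈ fibSetLoopA m PySem.Set.empty 0 1 (m.toNat + 4)) ↔ ((0 ≤ m ∧ x = 0) ∨ x ∈ L) := by
    intro x
    rw [mem_fibSetLoopA]
    simp only [PySem.Set.empty, List.not_mem_nil, false_or]
    exact mem_genFibs_A_iff m x
  have hA : arr.foldl
        (fun count i => if i ∈ fibSetLoopA m PySem.Set.empty 0 1 (m.toNat + 4) then count + 1 else count) 0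
      = (arr.countP (fun x => decide ((0 ≤ m ∧ x = 0) ∨ x ∈ L)) : Int) := by
    rw [PySem.List.foldl_ite_add_one, zero_add]
    exact congrArg (fun n : Nat => (n : Int))
      (List.countP_congr (fun x _ => by simp only [decide_eq_true_eq]; exact hmemA x))
  -- B's side
  have hB : fibCountLoopB (arr.foldl (fun d x => d.insert x (d.getD x 0 + 1)) PySem.Dict.empty) m
        (if 0 ≤ m then (arr.foldl (fun d x => d.insert x (d.getD x 0 + 1)) PySem.Dict.empty).getD 0 0 else 0)
        1 2 (m.toNat + 2)
      = (if 0 ≤ m then (arr.count 0 : Int) else 0)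
        + (arr.countP (fun x => decide (x ∈ L)) : Int) := by
    rw [fibCountLoopB_eq_sum]
    have hmap : (L.map (fun v => (arr.foldl (fun d x => d.insert x (d.getD x 0 + 1)) PySem.Dict.empty).getD v 0))
        = L.map (fun v => (arr.count v : Int)) :=
      List.map_congr_left (fun v _ => freq_getD_eq_count arr v)
    rw [← hLdef, hmap, sum_count_eq_countP arr L hLnd, freq_getD_eq_count arr 0]
  simp only []
  rw [hA, hB, countP_A_split m L h0L arr]
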